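-- pv_equiv track=rewrite | github.com/kkonstantinidis/Aspis | src/util.py | mols
-- ===== SOURCE A (Python) =====
-- def mols(n):
--     ''' Generate a set of mutually orthogonal latin squares
--         n must be prime
--     '''
--     r = range(n)
--     # r = range(1,n+1)
--
--     #Generate each Latin square
--     allgrids = []
--     for k in range(1, n):
--         grid = []
--         for i in r:
--             row = []
--             for j in r:
--                 a = (k*i + j) % n
--                 row.append(a)
--             grid.append(row)
--         allgrids.append(grid)
--
--     return allgrids
-- ===== SOURCE B (Python) =====
-- def mols(n):
--     ''' Generate a set of mutually orthogonal latin squares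
--         n must be prime
--     '''
--     base = list(range(n))
--     allgrids = []
--     for k in range(1, n):
--         grid = []
--         for i in base:
--             s = (k * i) % n
--             grid.append(base[s:] + base[:s])
--         allgrids.append(grid)
--     return allgrids
-- ===== Notes on version B (the rewrite author's own statement) =====
-- stated objective: simpler
-- what changed: B precomputes the base row list(range(n)) once and builds each row as a cyclic rotation base[s:]+base[:s] with s=(k*i)%n, eliminating A's innermost per-cell j-loop and its per-cell modular arithmetic.
import Mathlib
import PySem

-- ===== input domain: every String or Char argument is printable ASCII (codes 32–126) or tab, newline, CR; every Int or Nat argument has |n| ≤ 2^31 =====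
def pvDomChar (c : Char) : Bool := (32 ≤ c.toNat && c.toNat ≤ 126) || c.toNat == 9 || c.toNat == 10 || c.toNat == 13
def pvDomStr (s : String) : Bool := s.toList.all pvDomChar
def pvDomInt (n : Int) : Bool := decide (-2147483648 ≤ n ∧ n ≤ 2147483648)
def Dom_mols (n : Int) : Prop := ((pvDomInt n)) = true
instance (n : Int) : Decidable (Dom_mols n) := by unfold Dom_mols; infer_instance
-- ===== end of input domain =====

-- B builds each row as a cyclic rotation of a precomputed base row (two slices) instead of
-- recomputing (k*i+j) % n cell by cell in an innermost loop; objective: simpler.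

-- ===== PORT A =====
def mols (n : Int) : List (List (List Int)) :=
  (PySem.List.pyRange 1 n 1).foldl (fun allgrids k =>
    allgrids ++ [((PySem.List.pyRange 0 n 1).foldl (fun grid i =>
      grid ++ [((PySem.List.pyRange 0 n 1).foldl (fun row j =>
        row ++ [PySem.Int.mod (k * i + j) n]) [])]) [])]) []

-- ===== PORT B =====
-- helper: base[s:] + base[:s]
def rotRow (base : List Int) (s : Int) : List Int :=
  PySem.List.slice base (some s) none ++ PySem.List.slice base none (some s)

def mols_alt (n : Int) : List (List (List Int)) :=
  let base := PySem.List.pyRange 0 n 1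
  (PySem.List.pyRange 1 n 1).map (fun k =>
    base.map (fun i => rotRow base (PySem.Int.mod (k * i) n)))

-- ===== PRECONDITION & SPEC =====
def Spec_mols (n : Int) (out : List (List (List Int))) : Prop := out = mols_alt n
instance (n : Int) (out : List (List (List Int))) : Decidable (Spec_mols n out) := by unfold Spec_mols; infer_instance

-- ===== CLAIM (what is proved, stated in full; the proofs are below) =====
def Claim_equal_mols : Prop := ∀ (n : Int), Dom_mols n → Spec_mols n (mols n)

-- ===== LEMMAS AND PROOFS =====

-- A's inner j-loop produces exactly B's rotation of the base row by (m % n).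
lemma row_rot (n m : Int) (hn : 0 < n) :
    (PySem.List.pyRange 0 n 1).map (fun j => PySem.Int.mod (m + j) n)
      = rotRow (PySem.List.pyRange 0 n 1) (PySem.Int.mod m n) := by
  have hs0 : 0 ≤ PySem.Int.mod m n := PySem.Int.mod_nonneg m hn
  have hsn : PySem.Int.mod m n < n := PySem.Int.mod_lt m hn
  have hsem : PySem.Int.mod m n = m % n := PySem.Int.mod_eq_emod_of_pos hn
  set s := PySem.Int.mod m n with hsdef
  -- right-hand side: two slices = two halves of the base range
  have hRHS : rotRow (PySem.List.pyRange 0 n 1) s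
      = PySem.List.pyRange s n 1 ++ PySem.List.pyRange 0 s 1 := by
    unfold rotRow
    rw [PySem.List.slice_from _ hs0, PySem.List.slice_to _ hs0,
        PySem.List.pyRange_one_append 0 s n hs0 (le_of_lt hsn)]
    have hlen : (PySem.List.pyRange 0 s 1).length = s.toNat := by
      rw [PySem.List.length_pyRange_one]; norm_num
    rw [← hlen, List.drop_left, List.take_left]
  rw [hRHS]
  -- left-hand side: split the j-range at n - s
  rw [PySem.List.pyRange_one_append 0 (n - s) n (by omega) (by omega), List.map_append]
  have hm : m % n + n * (m / n) = m := Int.emod_add_mul_ediv m n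
  congr 1
  · -- j ∈ [0, n-s):  (m + j) % n = s + j
    rw [PySem.List.pyRange_one 0 (n - s), PySem.List.pyRange_one s n, List.map_map]
    have he : (n - s - 0).toNat = (n - s).toNat := by norm_num
    rw [he]
    apply List.map_congr_left
    intro a ha
    have ha' : (a : Int) < n - s := by
      rw [List.mem_range] at ha
      exact_mod_cast (Int.lt_toNat.mp ha)
    simp only [Function.comp_apply, zero_add]
    rw [PySem.Int.mod_eq_emod_of_pos hn]
    have : m + (a : Int) = (s + a) + n * (m / n) := by
      rw [hsem]; linarith [hm]
    rw [this, Int.add_mul_emod_self_left, Int.emod_eq_of_lt (by omega) (by omega)]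
  · -- j ∈ [n-s, n):  (m + j) % n = j - (n - s)
    rw [PySem.List.pyRange_one (n - s) n, PySem.List.pyRange_one 0 s, List.map_map]
    have he : (n - (n - s)).toNat = (s - 0).toNat := by norm_num
    rw [he]
    apply List.map_congr_left
    intro a ha
    have ha' : (a : Int) < s := by
      rw [List.mem_range] at ha
      have := Int.lt_toNat.mp ha
      omega
    simp only [Function.comp_apply, zero_add]
    rw [PySem.Int.mod_eq_emod_of_pos hn]
    have hx : n * (1 + m / n) = n + n * (m / n) := by ring
    have : m + (n - s + (a : Int)) = (a : Int) + n * (1 + m / n) := by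
      rw [hsem, hx]; linarith [hm]
    rw [this, Int.add_mul_emod_self_left, Int.emod_eq_of_lt (by omega) (by omega)]

-- ===== VERDICT (by name: the statement is the Claim_ definition above) =====
theorem mols_spec : Claim_equal_mols := by
  unfold Claim_equal_mols Spec_mols
  intro n _
  simp only [mols, mols_alt]
  rw [PySem.List.foldl_append_singleton_eq_map, List.nil_append]
  apply List.map_congr_left
  intro k hk
  have hk' := (PySem.List.mem_pyRange_one).mp hk
  have hn : 0 < n := by omega
  rw [PySem.List.foldl_append_singleton_eq_map, List.nil_append]
  apply List.map_congr_left
  intro i _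
  rw [PySem.List.foldl_append_singleton_eq_map, List.nil_append]
  exact row_rot n (k * i) hn
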